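-- pv_equiv track=rewrite | github.com/ChelsieLei/CrossHOI-Bench | script_eval_32B_newbench_internvl.py | label_choices
-- ===== SOURCE A (Python) =====
-- from typing import List, Dict, Iterable
--
-- def _label_to_index(label: str) -> int:
--     """
--     Excel 风格：A->1, B->2, ..., Z->26, AA->27, AB->28, ...
--     仅接受大写 A-Z 的非空串，否则报错。
--     """
--     if not label or any(not ('A' <= ch <= 'Z') for ch in label):
--         raise ValueError(f"无效的起始标签: {label!r}（仅支持大写 A-Z，例如 'A'、'C'、'AA'）")
--     val = 0
--     for ch in label:
--         val = val * 26 + (ord(ch) - ord('A') + 1)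
--     return val
--
-- def _index_to_label(idx: int) -> str:
--     """
--     1 -> A, 2 -> B, ..., 26 -> Z, 27 -> AA, ...
--     """
--     if idx <= 0:
--         raise ValueError(f"索引必须为正整数，收到 {idx}")
--     s = []
--     while idx > 0:
--         idx -= 1
--         s.append(chr(ord('A') + (idx % 26)))
--         idx //= 26
--     return ''.join(reversed(s))
--
-- def _labels(n: int, start: str = "A") -> List[str]:
--     """
--     生成长度为 n 的标签序列，从 start 开始（包含 start）。
--     例：_labels(5, 'Y') -> ['Y','Z','AA','AB','AC']
--     """
--     if n < 0:
--         raise ValueError("n 必须为非负整数")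
--     if n == 0:
--         return []
--     base = _label_to_index(start)
--     return [_index_to_label(base + i) for i in range(n)]
--
-- def label_choices(
--     choices: List[str],
--     start: str = "A",
--     az_only: bool = True,   # True 时只允许 A-Z；False 时用数字
-- ) -> Dict[str, str]:
--     """
--     将任意长度的 choices 列表映射为 {'A': choice0, 'B': choice1, ...}
--     - az_only=True：使用 A–Z / AA–AZ 形式；
--     - az_only=False：改为使用数字（'1', '2', '3', ...）。
--     """
--     if not choices:
--         return {}
--
--     if az_only:
--         # 规范化 start：允许传入小写，自动转大写
--         start = start.upper()
--         # 校验 start 合法性（仅大写 A-Z 串）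
--         _ = _label_to_index(start)
--         if len(start) != 1 or not ('A' <= start <= 'Z'):
--             raise ValueError("az_only=True 时，start 必须是单个大写字母（A-Z）。")
--         end_idx = ord(start) - ord('A') + len(choices)
--         if end_idx > 26:
--             raise ValueError("选项超过 26 个，且 az_only=True。请关闭 az_only 或减少数量。")
--         labels = _labels(len(choices), start=start)
--     else:
--         # 用数字编号，start 参数忽略
--         labels = [str(i + 1) for i in range(len(choices))]
--
--     return dict(zip(labels, choices))
-- ===== SOURCE B (Python) =====
-- def label_choices(choices, start="A", az_only=True):
--     if not choices:
--         return {}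
--     if az_only:
--         s = start.upper()
--         if len(s) != 1 or not ('A' <= s <= 'Z'):
--             raise ValueError("az_only=True requires start to be a single letter A-Z.")
--         base = ord(s) - ord('A')
--         if base + len(choices) > 26:
--             raise ValueError("More than 26 options with az_only=True.")
--         labels = [chr(ord('A') + base + i) for i in range(len(choices))]
--     else:
--         labels = [str(i + 1) for i in range(len(choices))]
--     return dict(zip(labels, choices))
-- ===== Notes on version B (the rewrite author's own statement) =====
-- stated objective: simpler
-- what changed: B drops A's three Excel-style base-26 helper functions (_label_to_index digit loop, _index_to_label divmod loop, _labels) and builds the labels directly with single-character arithmetic chr(ord('A')+base+i) (or str(i+1)) in one self-contained function.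
import Mathlib
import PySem

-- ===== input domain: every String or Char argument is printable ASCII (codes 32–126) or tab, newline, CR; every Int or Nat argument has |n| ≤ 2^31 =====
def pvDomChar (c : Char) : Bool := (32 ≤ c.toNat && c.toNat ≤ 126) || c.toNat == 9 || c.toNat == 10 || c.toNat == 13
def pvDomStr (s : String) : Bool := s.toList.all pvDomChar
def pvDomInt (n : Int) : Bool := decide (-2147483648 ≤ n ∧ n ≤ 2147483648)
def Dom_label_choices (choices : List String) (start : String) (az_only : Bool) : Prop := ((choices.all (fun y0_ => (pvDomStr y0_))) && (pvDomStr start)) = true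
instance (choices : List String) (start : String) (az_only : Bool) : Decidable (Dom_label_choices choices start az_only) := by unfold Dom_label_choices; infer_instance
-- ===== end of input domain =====

-- B replaces A's Excel-style base-26 index↔label helper chain with direct character
-- arithmetic in one self-contained function (objective: simpler).

-- shared port of the final `dict(zip(labels, choices))` that BOTH Pythons perform verbatim
def pvDictZip (labels choices : List String) : List (String × String) :=
  (PySem.Dict.ofList (labels.zip choices)).items

-- ===== PORT A =====
-- _label_to_index: none exactly where Python raises ValueError
def pvLabelToIndex? (label : List Char) : Option Int :=
  if label = [] ∨ label.any (fun ch => !('A' ≤ ch && ch ≤ 'Z')) then none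
  else some (label.foldl (fun v ch => v * 26 + ((ch.toNat : Int) - 65 + 1)) 0)

-- the while-loop of _index_to_label (entered with idx > 0; the 'idx <= 0' raise branch of
-- _index_to_label is unreachable from label_choices, where idx = base + i ≥ 1 always)
def pvIndexToLabelLoop : Nat → List Char → List Char
  | 0, s => s
  | n + 1, s => pvIndexToLabelLoop (n / 26) (s ++ [Char.ofNat (65 + n % 26)])
  decreasing_by exact Nat.lt_succ_of_le (Nat.div_le_self n 26)

def pvIndexToLabel (idx : Int) : String :=
  String.ofList (pvIndexToLabelLoop idx.toNat []).reverse

-- _labels (its 'n < 0' raise branch is unreachable: n = len(choices) ≥ 0)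
def pvLabels (n : Int) (start : String) : List String :=
  if n < 0 then []
  else if n = 0 then []
  else
    match pvLabelToIndex? start.toList with
    | none => []  -- ValueError; outside Pre_
    | some base => (PySem.List.pyRange 0 n 1).map (fun i => pvIndexToLabel (base + i))

def label_choices (choices : List String) (start : String) (az_only : Bool) : List (String × String) :=
  if choices = [] then []
  else
    pvDictZip
      (if az_only then
        match pvLabelToIndex? (PySem.Str.upper start).toList with
        | none => []  -- ValueError; outside Pre_
        | some _ =>
          if (PySem.Str.upper start).toList.length ≠ 1 ∨
             ¬('A' ≤ (PySem.Str.upper start).toList.headD ' ' ∧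
               (PySem.Str.upper start).toList.headD ' ' ≤ 'Z') then []  -- ValueError
          else
            if (((PySem.Str.upper start).toList.headD ' ').toNat : Int) - 65 + choices.length > 26
            then []  -- ValueError
            else pvLabels choices.length (PySem.Str.upper start)
      else (PySem.List.pyRange 0 choices.length 1).map (fun i => PySem.Int.toStr (i + 1)))
      choices

-- ===== PORT B =====
def label_choices_alt (choices : List String) (start : String) (az_only : Bool) : List (String × String) :=
  if choices = [] then []
  else
    pvDictZip
      (if az_only then
        if (PySem.Str.upper start).toList.length ≠ 1 ∨
           ¬('A' ≤ (PySem.Str.upper start).toList.headD ' ' ∧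
             (PySem.Str.upper start).toList.headD ' ' ≤ 'Z') then []  -- ValueError
        else
          if ((PySem.Str.upper start).toList.headD ' ').toNat - 65 + choices.length > 26
          then []  -- ValueError
          else
            (List.range choices.length).map
              (fun i => String.ofList
                [Char.ofNat (65 + (((PySem.Str.upper start).toList.headD ' ').toNat - 65) + i)])
      else (List.range choices.length).map (fun i : Nat => PySem.Int.toStr ((i : Int) + 1)))
      choices

-- ===== PRECONDITION & SPEC =====
-- Pre_ excludes exactly the inputs on which Python A raises ValueError: nonempty choices with
-- az_only=True whose upper-cased start is not a single letter A-Z, or with too many choices.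
def Pre_label_choices (choices : List String) (start : String) (az_only : Bool) : Prop :=
  choices = [] ∨ az_only = false ∨
  ((PySem.Str.upper start).toList.length = 1 ∧
   'A' ≤ (PySem.Str.upper start).toList.headD ' ' ∧
   (PySem.Str.upper start).toList.headD ' ' ≤ 'Z' ∧
   (((PySem.Str.upper start).toList.headD ' ').toNat : Int) - 65 + choices.length ≤ 26)
instance (choices : List String) (start : String) (az_only : Bool) : Decidable (Pre_label_choices choices start az_only) := by unfold Pre_label_choices; infer_instance

def pvWitness_label_choices : List String × String × Bool := (["yes", "no"], "a", true)

def Spec_label_choices (choices : List String) (start : String) (az_only : Bool) (out : List (String × String)) : Prop := out = label_choices_alt choices start az_only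
instance (choices : List String) (start : String) (az_only : Bool) (out : List (String × String)) : Decidable (Spec_label_choices choices start az_only out) := by unfold Spec_label_choices; infer_instance

-- ===== CLAIM (what is proved, stated in full; the proofs are below) =====
def Claim_equal_label_choices : Prop := ∀ (choices : List String) (start : String) (az_only : Bool), Dom_label_choices choices start az_only → Pre_label_choices choices start az_only → Spec_label_choices choices start az_only (label_choices choices start az_only)

-- ===== LEMMAS AND PROOFS =====

-- an in-range index yields a one-character label
theorem pvLoop_small (m : Nat) (h : m ≤ 25) :
    pvIndexToLabelLoop (m + 1) [] = [Char.ofNat (65 + m)] := by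
  rw [pvIndexToLabelLoop]
  rw [Nat.div_eq_of_lt (by omega), Nat.mod_eq_of_lt (by omega)]
  rw [pvIndexToLabelLoop]
  rfl

theorem pvIndexToLabel_small (idx : Int) (h1 : 1 ≤ idx) (h2 : idx ≤ 26) :
    pvIndexToLabel idx = String.ofList [Char.ofNat (65 + (idx.toNat - 1))] := by
  unfold pvIndexToLabel
  have hm : idx.toNat = (idx.toNat - 1) + 1 := by omega
  rw [hm, pvLoop_small _ (by omega)]
  rfl

theorem pvLabelToIndex_single (c : Char) (hA : 'A' ≤ c) (hZ : c ≤ 'Z') :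
    pvLabelToIndex? [c] = some ((c.toNat : Int) - 64) := by
  unfold pvLabelToIndex?
  rw [if_neg]
  · congr 1
    simp only [List.foldl_cons, List.foldl_nil]
    ring
  · rintro (h | h)
    · exact List.cons_ne_nil _ _ h
    · simp only [List.any_cons, List.any_nil, Bool.or_false, Bool.not_eq_true',
        Bool.and_eq_false_iff, decide_eq_false_iff_not] at h
      rcases h with h | h
      · exact h hA
      · exact h hZ

-- ===== VERDICT (by name: the statement is the Claim_ definition above) =====
theorem label_choices_spec : Claim_equal_label_choices := by
  intro choices start az_only _hdom hpre
  unfold Spec_label_choices label_choices label_choices_alt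
  by_cases hc : choices = []
  · simp [hc]
  · simp only [if_neg hc]
    congr 1
    rcases hpre with hpre | hpre | hpre
    · exact absurd hpre hc
    · subst hpre
      simp only [Bool.false_eq_true, if_false]
      rw [PySem.List.pyRange_zero_nat, List.map_map]
      rfl
    · obtain ⟨hlen, hA, hZ, hend⟩ := hpre
      obtain ⟨c, hc1⟩ := List.length_eq_one_iff.mp hlen
      rw [hc1] at hA hZ hend
      simp only [List.headD_cons] at hA hZ hend
      have h65 : 65 ≤ c.toNat := hA
      have h90 : c.toNat ≤ 90 := hZ
      have hguard : ¬ (([c] : List Char).length ≠ 1 ∨ ¬('A' ≤ c ∧ c ≤ 'Z')) := by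
        rintro (h | h)
        · exact h rfl
        · exact h ⟨hA, hZ⟩
      cases az_only with
      | false =>
        simp only [Bool.false_eq_true, if_false]
        rw [PySem.List.pyRange_zero_nat, List.map_map]
        rfl
      | true =>
        rw [if_pos rfl, if_pos rfl, hc1, pvLabelToIndex_single c hA hZ]
        dsimp only
        simp only [List.headD_cons]
        rw [if_neg hguard, if_neg hguard]
        rw [if_neg (by omega : ¬ ((c.toNat : Int) - 65 + choices.length > 26))]
        rw [if_neg (by omega : ¬ (c.toNat - 65 + choices.length > 26))]
        unfold pvLabels
        have hn0 : (choices.length : Int) ≠ 0 := by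
          simp only [ne_eq, Nat.cast_eq_zero, List.length_eq_zero_iff]
          exact hc
        rw [if_neg (by omega : ¬ ((choices.length : Int) < 0)), if_neg hn0]
        rw [hc1, pvLabelToIndex_single c hA hZ]
        dsimp only
        rw [PySem.List.pyRange_zero_nat, List.map_map]
        apply List.map_congr_left
        intro i hi
        have hilt : i < choices.length := List.mem_range.mp hi
        simp only [Function.comp]
        rw [pvIndexToLabel_small ((c.toNat : Int) - 64 + i) (by omega) (by omega)]
        have harg : 65 + (((c.toNat : Int) - 64 + (i : Int)).toNat - 1) = 65 + (c.toNat - 65) + i := by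
          omega
        rw [harg]
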